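-- pv_equiv track=rewrite | github.com/Domantas1337/Bioinformatics_first_task | Pirma.py | find_longest_codon_pairs
-- ===== SOURCE A (Python) =====
-- def find_longest_codon_pairs(start_stop_pairs_unsorted):
--
-- 	start_stop_pairs = sorted(start_stop_pairs_unsorted, key=lambda x: x[1])
--
--
-- 	current_stop_codon = -1
-- 	longest_codon_pairs = []
--
--
-- 	for codon_pair in start_stop_pairs:
-- 		if (current_stop_codon != codon_pair[1]):
-- 			longest_codon_pairs.append(codon_pair)
-- 			current_stop_codon = codon_pair[1]
-- 		else:
-- 			continue
--
-- 	return longest_codon_pairs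
-- ===== SOURCE B (Python) =====
-- def find_longest_codon_pairs(start_stop_pairs_unsorted):
-- 	first_by_stop = {}
-- 	for pair in start_stop_pairs_unsorted:
-- 		first_by_stop.setdefault(pair[1], pair)
-- 	return sorted(first_by_stop.values(), key=lambda p: p[1])
-- ===== Notes on version B (the rewrite author's own statement) =====
-- stated objective: idiomatic
-- what changed: Replaces A's stable-sort-then-consecutive-dedup with a -1 sentinel by a dict pass keeping the first pair per distinct stop codon followed by a sort of the representatives.
-- intended difference: On inputs whose minimal stop value is exactly -1, A's sentinel current_stop_codon = -1 silently drops every pair with stop -1, while B returns the first pair with stop -1 like for any other stop value, which is the intended behaviour. — e.g. on find_longest_codon_pairs([(5, -1)]): A returns [], B returns [(5, -1)]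
import Mathlib
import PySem

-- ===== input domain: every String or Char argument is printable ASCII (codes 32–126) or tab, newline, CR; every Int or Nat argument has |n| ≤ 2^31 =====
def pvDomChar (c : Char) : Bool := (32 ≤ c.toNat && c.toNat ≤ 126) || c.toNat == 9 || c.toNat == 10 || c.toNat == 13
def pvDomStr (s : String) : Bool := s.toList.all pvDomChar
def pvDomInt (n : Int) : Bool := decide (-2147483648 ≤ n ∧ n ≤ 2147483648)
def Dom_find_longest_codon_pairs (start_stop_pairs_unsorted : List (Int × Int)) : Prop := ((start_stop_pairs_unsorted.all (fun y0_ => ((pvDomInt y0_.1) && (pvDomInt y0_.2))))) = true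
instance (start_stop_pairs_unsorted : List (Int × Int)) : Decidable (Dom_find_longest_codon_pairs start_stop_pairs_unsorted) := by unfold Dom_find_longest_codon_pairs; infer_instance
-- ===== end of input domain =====

-- B keeps the first pair per distinct stop codon via a dict pass and then sorts the
-- representatives, instead of A's sort-then-consecutive-dedup with a -1 sentinel.

-- ===== PORT A =====
def find_longest_codon_pairs (start_stop_pairs_unsorted : List (Int × Int)) : List (Int × Int) :=
  let start_stop_pairs := PySem.List.sorted start_stop_pairs_unsorted (fun x => x.2)
  (start_stop_pairs.foldl
    (fun (st : Int × List (Int × Int)) codon_pair =>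
      if st.1 ≠ codon_pair.2 then (codon_pair.2, st.2 ++ [codon_pair]) else st)
    (-1, [])).2

-- ===== PORT B =====
def find_longest_codon_pairs_alt (start_stop_pairs_unsorted : List (Int × Int)) : List (Int × Int) :=
  let first_by_stop :=
    start_stop_pairs_unsorted.foldl (fun d pair => d.setdefault pair.2 pair)
      (PySem.Dict.empty (κ := Int) (ν := Int × Int))
  PySem.List.sorted first_by_stop.values (fun p => p.2)

-- ===== PRECONDITION & SPEC =====
-- On inputs whose minimal stop value is exactly -1, A's sentinel current_stop_codon = -1
-- silently drops every pair with stop -1, while B returns the first pair with stop -1 like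
-- for every other stop value, which is the intended behaviour.
def D_find_longest_codon_pairs (start_stop_pairs_unsorted : List (Int × Int)) : Prop :=
  (∃ p ∈ start_stop_pairs_unsorted, p.2 = -1) ∧ (∀ q ∈ start_stop_pairs_unsorted, -1 ≤ q.2)
instance (start_stop_pairs_unsorted : List (Int × Int)) : Decidable (D_find_longest_codon_pairs start_stop_pairs_unsorted) := by unfold D_find_longest_codon_pairs; infer_instance

def Spec_find_longest_codon_pairs (start_stop_pairs_unsorted : List (Int × Int)) (out : List (Int × Int)) : Prop := ¬ D_find_longest_codon_pairs start_stop_pairs_unsorted → out = find_longest_codon_pairs_alt start_stop_pairs_unsorted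
instance (start_stop_pairs_unsorted : List (Int × Int)) (out : List (Int × Int)) : Decidable (Spec_find_longest_codon_pairs start_stop_pairs_unsorted out) := by unfold Spec_find_longest_codon_pairs; infer_instance

def pvDiffWitness_find_longest_codon_pairs : (List (Int × Int)) := [(5, -1)]
def pvDiffWitnessOut_find_longest_codon_pairs : (List (Int × Int)) × (List (Int × Int)) := ([], [(5, -1)])

-- ===== CLAIM (what is proved, stated in full; the proofs are below) =====
def Claim_unchanged_find_longest_codon_pairs : Prop := ∀ (start_stop_pairs_unsorted : List (Int × Int)), Dom_find_longest_codon_pairs start_stop_pairs_unsorted → Spec_find_longest_codon_pairs start_stop_pairs_unsorted (find_longest_codon_pairs start_stop_pairs_unsorted)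
def Claim_changed_find_longest_codon_pairs : Prop := Dom_find_longest_codon_pairs (pvDiffWitness_find_longest_codon_pairs) ∧ D_find_longest_codon_pairs (pvDiffWitness_find_longest_codon_pairs) ∧ find_longest_codon_pairs (pvDiffWitness_find_longest_codon_pairs) = pvDiffWitnessOut_find_longest_codon_pairs.1 ∧ find_longest_codon_pairs_alt (pvDiffWitness_find_longest_codon_pairs) = pvDiffWitnessOut_find_longest_codon_pairs.2 ∧ pvDiffWitnessOut_find_longest_codon_pairs.1 ≠ pvDiffWitnessOut_find_longest_codon_pairs.2
def Claim_exact_find_longest_codon_pairs : Prop := ∀ (start_stop_pairs_unsorted : List (Int × Int)), Dom_find_longest_codon_pairs start_stop_pairs_unsorted → D_find_longest_codon_pairs start_stop_pairs_unsorted → find_longest_codon_pairs start_stop_pairs_unsorted ≠ find_longest_codon_pairs_alt start_stop_pairs_unsorted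

-- ===== LEMMAS AND PROOFS =====

-- A's loop, as a recursion: keep a pair iff its stop differs from the running stop.
def dedupLoop (c : Int) : List (Int × Int) → List (Int × Int)
  | [] => []
  | x :: r => if c ≠ x.2 then x :: dedupLoop x.2 r else dedupLoop c r

-- B's dict pass, as a recursion over values: keep a pair iff its stop was not seen yet.
def firsts (seen : List Int) : List (Int × Int) → List (Int × Int)
  | [] => []
  | p :: r => if p.2 ∈ seen then firsts seen r else p :: firsts (p.2 :: seen) r

lemma foldl_eq_dedupLoop (xs : List (Int × Int)) (c : Int) (acc : List (Int × Int)) :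
    (xs.foldl
      (fun (st : Int × List (Int × Int)) codon_pair =>
        if st.1 ≠ codon_pair.2 then (codon_pair.2, st.2 ++ [codon_pair]) else st)
      (c, acc)).2 = acc ++ dedupLoop c xs := by
  induction xs generalizing c acc with
  | nil => simp [dedupLoop]
  | cons x r ih =>
    rw [List.foldl_cons]
    by_cases h : c = x.2
    · rw [if_neg (not_ne_iff.mpr h)]
      simp only [dedupLoop, if_neg (not_ne_iff.mpr h)]
      exact ih c acc
    · rw [if_pos h]
      simp only [dedupLoop, if_pos h]
      rw [ih x.2 (acc ++ [x]), List.append_assoc]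
      rfl

lemma dedup_inv (xs : List (Int × Int)) (c : Int)
    (hs : xs.Pairwise (fun a b => a.2 ≤ b.2)) (hc : ∀ y ∈ xs, c ≤ y.2) :
    (∀ y ∈ dedupLoop c xs, c < y.2 ∧ List.find? (fun p => p.2 == y.2) xs = some y) ∧
      (dedupLoop c xs).Pairwise (fun a b => a.2 < b.2) := by
  induction xs generalizing c with
  | nil => simp [dedupLoop]
  | cons x r ih =>
    rcases List.pairwise_cons.1 hs with ⟨hx, hr⟩
    have hcx : c ≤ x.2 := hc x (by simp)
    by_cases h : c = x.2
    · simp only [dedupLoop, if_neg (not_ne_iff.mpr h)]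
      obtain ⟨hinv, hpw⟩ := ih c hr (fun y hy => le_trans hcx (hx y hy))
      refine ⟨fun y hy => ?_, hpw⟩
      obtain ⟨hlt, hfind⟩ := hinv y hy
      refine ⟨hlt, ?_⟩
      rw [List.find?_cons_of_neg (by simp only [beq_iff_eq]; omega), hfind]
    · have hcx' : c < x.2 := lt_of_le_of_ne hcx h
      simp only [dedupLoop, if_pos h]
      obtain ⟨hinv, hpw⟩ := ih x.2 hr hx
      constructor
      · intro y hy
        rcases List.mem_cons.1 hy with rfl | hy'
        · exact ⟨hcx', by rw [List.find?_cons_of_pos (by simp)]⟩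
        · obtain ⟨hlt, hfind⟩ := hinv y hy'
          exact ⟨lt_trans hcx' hlt,
            by rw [List.find?_cons_of_neg (by simp only [beq_iff_eq]; omega), hfind]⟩
      · exact List.pairwise_cons.2 ⟨fun y hy => (hinv y hy).1, hpw⟩

lemma dedup_cover (xs : List (Int × Int)) (c : Int) (k : Int)
    (hs : xs.Pairwise (fun a b => a.2 ≤ b.2)) (hc : ∀ y ∈ xs, c ≤ y.2)
    (hk : ∃ p ∈ xs, p.2 = k) : k = c ∨ ∃ y ∈ dedupLoop c xs, y.2 = k := by
  induction xs generalizing c with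
  | nil => simp at hk
  | cons x r ih =>
    rcases List.pairwise_cons.1 hs with ⟨hx, hr⟩
    by_cases h : c = x.2
    · simp only [dedupLoop, if_neg (not_ne_iff.mpr h)]
      rcases hk with ⟨p, hp, rfl⟩
      rcases List.mem_cons.1 hp with rfl | hp'
      · exact Or.inl h.symm
      · exact ih c hr (fun y hy => le_trans (hc x (by simp)) (hx y hy)) ⟨p, hp', rfl⟩
    · simp only [dedupLoop, if_pos h]
      rcases hk with ⟨p, hp, rfl⟩
      rcases List.mem_cons.1 hp with rfl | hp'
      · exact Or.inr ⟨p, by simp, rfl⟩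
      · rcases ih x.2 hr hx ⟨p, hp', rfl⟩ with heq | ⟨y, hy, hyk⟩
        · exact Or.inr ⟨x, by simp, heq.symm⟩
        · exact Or.inr ⟨y, by simp [hy], hyk⟩

lemma firsts_congr (s s' : List Int) (l : List (Int × Int)) (h : ∀ k, k ∈ s ↔ k ∈ s') :
    firsts s l = firsts s' l := by
  induction l generalizing s s' with
  | nil => rfl
  | cons p r ih =>
    simp only [firsts]
    by_cases hp : p.2 ∈ s
    · rw [if_pos hp, if_pos ((h p.2).1 hp), ih s s' h]
    · rw [if_neg hp, if_neg (fun hx => hp ((h p.2).2 hx))]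
      exact congrArg _ (ih _ _ (by intro k; simp [h k]))

lemma values_fold_setdefault (l : List (Int × Int)) (d : PySem.Dict Int (Int × Int)) :
    (l.foldl (fun d pair => d.setdefault pair.2 pair) d).values = d.values ++ firsts d.keys l := by
  induction l generalizing d with
  | nil => simp [firsts]
  | cons p r ih =>
    rw [List.foldl_cons]
    by_cases hct : d.contains p.2 = true
    · have hmem : p.2 ∈ d.keys := (PySem.Dict.contains_iff_mem_keys d p.2).1 hct
      rw [show d.setdefault p.2 p = d by simp [PySem.Dict.setdefault, hct], ih d]
      simp only [firsts, if_pos hmem]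
    · have hmem : p.2 ∉ d.keys := fun hm =>
        hct ((PySem.Dict.contains_iff_mem_keys d p.2).2 hm)
      rw [show d.setdefault p.2 p = PySem.Dict.mk (d.items ++ [(p.2, p)]) by
        simp [PySem.Dict.setdefault, hct], ih]
      have hv : (PySem.Dict.mk (d.items ++ [(p.2, p)]) : PySem.Dict Int (Int × Int)).values
          = d.values ++ [p] := by simp [PySem.Dict.values]
      have hk : (PySem.Dict.mk (d.items ++ [(p.2, p)]) : PySem.Dict Int (Int × Int)).keys
          = d.keys ++ [p.2] := by simp [PySem.Dict.keys]
      rw [hv, hk, firsts_congr (d.keys ++ [p.2]) (p.2 :: d.keys) r (by intro k; simp [or_comm])]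
      simp only [firsts, if_neg hmem, List.append_assoc, List.singleton_append]

lemma firsts_inv (l : List (Int × Int)) (seen : List Int) :
    (∀ y ∈ firsts seen l, y.2 ∉ seen ∧ List.find? (fun p => p.2 == y.2) l = some y) ∧
      ((firsts seen l).map (fun p => p.2)).Nodup := by
  induction l generalizing seen with
  | nil => simp [firsts]
  | cons p r ih =>
    simp only [firsts]
    by_cases hp : p.2 ∈ seen
    · rw [if_pos hp]
      obtain ⟨hinv, hnd⟩ := ih seen
      refine ⟨fun y hy => ?_, hnd⟩
      obtain ⟨hns, hfind⟩ := hinv y hy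
      exact ⟨hns, by
        rw [List.find?_cons_of_neg (by
          simp only [beq_iff_eq]; intro hh; exact hns (by rwa [← hh])), hfind]⟩
    · rw [if_neg hp]
      obtain ⟨hinv, hnd⟩ := ih (p.2 :: seen)
      constructor
      · intro y hy
        rcases List.mem_cons.1 hy with rfl | hy'
        · exact ⟨hp, by rw [List.find?_cons_of_pos (by simp)]⟩
        · obtain ⟨hns, hfind⟩ := hinv y hy'
          have hne : ¬ p.2 = y.2 := fun hh => hns (by simp [← hh])
          exact ⟨fun hsn => hns (List.mem_cons_of_mem _ hsn), by
            rw [List.find?_cons_of_neg (by simpa using hne), hfind]⟩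
      · rw [List.map_cons]
        refine List.nodup_cons.2 ⟨fun hmem => ?_, hnd⟩
        obtain ⟨y, hy, hyk⟩ := List.mem_map.1 hmem
        exact (hinv y hy).1 (by simp [hyk])

lemma firsts_cover (l : List (Int × Int)) (seen : List Int) (k : Int)
    (hns : k ∉ seen) (hk : ∃ p ∈ l, p.2 = k) : ∃ y ∈ firsts seen l, y.2 = k := by
  induction l generalizing seen with
  | nil => simp at hk
  | cons p r ih =>
    simp only [firsts]
    by_cases hp : p.2 ∈ seen
    · rw [if_pos hp]
      rcases hk with ⟨q, hq, rfl⟩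
      rcases List.mem_cons.1 hq with rfl | hq'
      · exact absurd hp hns
      · exact ih seen hns ⟨q, hq', rfl⟩
    · rw [if_neg hp]
      rcases hk with ⟨q, hq, rfl⟩
      by_cases hqq : q.2 = p.2
      · exact ⟨p, by simp, hqq.symm⟩
      · rcases List.mem_cons.1 hq with rfl | hq'
        · exact absurd rfl hqq
        · obtain ⟨y, hy, hyk⟩ := ih (p.2 :: seen) (by simp [hns, hqq]) ⟨q, hq', rfl⟩
          exact ⟨y, List.mem_cons_of_mem _ hy, hyk⟩

lemma find?_insertBy (x : Int × Int) (ys : List (Int × Int)) (k : Int)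
    (hs : ys.Pairwise (fun a b => a.2 ≤ b.2)) :
    List.find? (fun p => p.2 == k)
        (PySem.List.insertBy (fun a b => decide (a.2 < b.2)) x ys) =
      (List.find? (fun p => p.2 == k) ys).orElse
        (fun _ => if x.2 == k then some x else none) := by
  induction ys with
  | nil => simp [PySem.List.insertBy]
  | cons y ys ih =>
    rcases List.pairwise_cons.1 hs with ⟨hy, hys⟩
    simp only [PySem.List.insertBy]
    by_cases hlt : x.2 < y.2
    · rw [if_pos (by simpa using hlt)]
      by_cases hxk : x.2 = k
      · have hnone : List.find? (fun p => p.2 == k) (y :: ys) = none := by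
          rw [List.find?_eq_none]
          intro z hz
          rcases List.mem_cons.1 hz with rfl | hz'
          · simp only [beq_iff_eq]; omega
          · have := hy z hz'; simp only [beq_iff_eq]; omega
        rw [hnone, List.find?_cons_of_pos (by simpa using hxk)]
        simp [Option.orElse, hxk]
      · rw [List.find?_cons_of_neg (by simpa using hxk)]
        cases hf : List.find? (fun p => p.2 == k) (y :: ys) <;>
          simp [Option.orElse, hxk]
    · rw [if_neg (by simpa using hlt)]
      by_cases hyk : y.2 = k
      · rw [List.find?_cons_of_pos (by simpa using hyk),
          List.find?_cons_of_pos (by simpa using hyk)]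
        simp [Option.orElse]
      · rw [List.find?_cons_of_neg (by simpa using hyk),
          List.find?_cons_of_neg (by simpa using hyk), ih hys]

lemma find?_sorted (l : List (Int × Int)) (k : Int) :
    List.find? (fun p => p.2 == k) (PySem.List.sorted l (fun p => p.2)) =
      List.find? (fun p => p.2 == k) l := by
  induction l using List.reverseRecOn with
  | nil => rfl
  | append_singleton l x ih =>
    have hins : PySem.List.sorted (l ++ [x]) (fun p => p.2) =
        PySem.List.insertBy (fun a b => decide (a.2 < b.2)) x
          (PySem.List.sorted l (fun p => p.2)) := by
      rw [PySem.List.sorted_eq_foldl_insertBy, PySem.List.sorted_eq_foldl_insertBy,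
        List.foldl_append, List.foldl_cons, List.foldl_nil]
    rw [hins, find?_insertBy x _ k (PySem.List.sorted_pairwise l (fun p => p.2)), ih,
      List.find?_append]
    cases hf : List.find? (fun p => p.2 == k) l <;>
      by_cases hxk : x.2 = k <;> simp [Option.orElse, Option.or, hxk]

lemma A_eq_dedup (l : List (Int × Int)) :
    find_longest_codon_pairs l = dedupLoop (-1) (PySem.List.sorted l (fun x => x.2)) := by
  unfold find_longest_codon_pairs
  rw [foldl_eq_dedupLoop, List.nil_append]

lemma alt_eq_firsts (l : List (Int × Int)) :
    find_longest_codon_pairs_alt l = PySem.List.sorted (firsts [] l) (fun p => p.2) := by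
  show PySem.List.sorted
      (List.foldl (fun d pair => d.setdefault pair.2 pair)
        (PySem.Dict.empty (κ := Int) (ν := Int × Int)) l).values (fun p => p.2) = _
  rw [values_fold_setdefault]
  simp [PySem.Dict.values, PySem.Dict.keys, PySem.Dict.empty]

lemma alt_eq_dedup (l : List (Int × Int)) :
    find_longest_codon_pairs_alt l =
      (match PySem.List.sorted l (fun p => p.2) with
        | [] => []
        | x :: r => x :: dedupLoop x.2 r) := by
  rw [alt_eq_firsts]
  cases hS : PySem.List.sorted l (fun p => p.2) with
  | nil =>
    have hl : l = [] := (PySem.List.sorted_eq_nil_iff _ _ _).1 hS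
    subst hl; rfl
  | cons x r =>
    have hpw : (x :: r).Pairwise (fun a b : Int × Int => a.2 ≤ b.2) := by
      have := PySem.List.sorted_pairwise l (fun p => p.2); rwa [hS] at this
    rcases List.pairwise_cons.1 hpw with ⟨hx, hr⟩
    obtain ⟨hdinv, hdpw⟩ := dedup_inv r x.2 hr hx
    obtain ⟨hfinv, hfnd⟩ := firsts_inv l []
    have hmemF : ∀ y ∈ x :: dedupLoop x.2 r,
        List.find? (fun p => p.2 == y.2) l = some y := by
      intro y hy
      rw [← find?_sorted, hS]
      rcases List.mem_cons.1 hy with rfl | hy'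
      · rw [List.find?_cons_of_pos (by simp)]
      · obtain ⟨hlt, hfind⟩ := hdinv y hy'
        rw [List.find?_cons_of_neg (by simp only [beq_iff_eq]; omega), hfind]
    have hmemG : ∀ y ∈ firsts [] l, List.find? (fun p => p.2 == y.2) l = some y :=
      fun y hy => (hfinv y hy).2
    have hpwlt : (x :: dedupLoop x.2 r).Pairwise (fun a b => a.2 < b.2) :=
      List.pairwise_cons.2 ⟨fun y hy => (hdinv y hy).1, hdpw⟩
    have hnd1 : ((x :: dedupLoop x.2 r).map (fun p => p.2)).Nodup :=
      List.pairwise_map.mpr (hpwlt.imp (fun h => ne_of_lt h))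
    have hmem : ∀ kk : Int, kk ∈ (x :: dedupLoop x.2 r).map (fun p => p.2) ↔
        kk ∈ (firsts [] l).map (fun p => p.2) := by
      intro kk
      constructor
      · intro hkk
        obtain ⟨y, hy, rfl⟩ := List.mem_map.1 hkk
        have hyl : y ∈ l := List.mem_of_find?_eq_some (hmemF y hy)
        obtain ⟨z, hz, hzk⟩ := firsts_cover l [] y.2 (by simp) ⟨y, hyl, rfl⟩
        exact List.mem_map.2 ⟨z, hz, hzk⟩
      · intro hkk
        obtain ⟨z, hz, rfl⟩ := List.mem_map.1 hkk
        have hzl : z ∈ l := List.mem_of_find?_eq_some (hmemG z hz)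
        have hzs : z ∈ x :: r := by
          rw [← hS]; exact (PySem.List.mem_sorted _ _ _ _).2 hzl
        rcases List.mem_cons.1 hzs with rfl | hz'
        · exact List.mem_map.2 ⟨z, by simp, rfl⟩
        · rcases dedup_cover r x.2 z.2 hr hx ⟨z, hz', rfl⟩ with heq | ⟨y, hy, hyk⟩
          · exact List.mem_map.2 ⟨x, by simp, heq.symm⟩
          · exact List.mem_map.2 ⟨y, by simp [hy], hyk⟩
    have hpermk := (List.perm_ext_iff_of_nodup hnd1 hfnd).2 hmem
    have hFg : ∀ (ys : List (Int × Int)),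
        (∀ y ∈ ys, List.find? (fun p => p.2 == y.2) l = some y) →
        ys = (ys.map (fun p => p.2)).map
          (fun kk => (List.find? (fun p => p.2 == kk) l).getD (0, 0)) := by
      intro ys hys
      rw [List.map_map]
      symm
      calc ys.map ((fun kk => (List.find? (fun p => p.2 == kk) l).getD (0, 0)) ∘
              (fun p => p.2))
            = ys.map id := List.map_congr_left (fun y hy => by
              simp only [Function.comp_apply, hys y hy, Option.getD_some, id_eq])
        _ = ys := List.map_id ys
    have hperm : (x :: dedupLoop x.2 r).Perm (firsts [] l) := by
      rw [hFg _ hmemF, hFg _ hmemG]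
      exact hpermk.map _
    exact PySem.List.sorted_eq_of_perm_of_pairwise_lt _ _ _ hperm hpwlt

theorem find_longest_codon_pairs_spec : Claim_unchanged_find_longest_codon_pairs := by
  intro l hdom hnd
  show find_longest_codon_pairs l = find_longest_codon_pairs_alt l
  rw [A_eq_dedup, alt_eq_dedup]
  cases hS : PySem.List.sorted l (fun x => x.2) with
  | nil => rfl
  | cons x r =>
    have hx2 : x.2 ≠ -1 := by
      intro h
      apply hnd
      refine ⟨⟨x, (PySem.List.mem_sorted l _ false x).1 (by rw [hS]; simp), h⟩, ?_⟩
      intro q hq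
      have hle : x.2 ≤ q.2 := PySem.List.key_head_sorted_le l (fun x => x.2) hS q hq
      omega
    simp only [dedupLoop, if_pos (show (-1 : Int) ≠ x.2 from fun hh => hx2 hh.symm)]

theorem find_longest_codon_pairs_changed : Claim_changed_find_longest_codon_pairs := by
  unfold Claim_changed_find_longest_codon_pairs; decide

theorem find_longest_codon_pairs_tight : Claim_exact_find_longest_codon_pairs := by
  intro l hdom hD heq
  obtain ⟨⟨p, hp, hp2⟩, hall⟩ := hD
  obtain ⟨y, hy, hyk⟩ := firsts_cover l [] (-1) (by simp) ⟨p, hp, hp2⟩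
  have hyB : y ∈ find_longest_codon_pairs_alt l := by
    rw [alt_eq_firsts]
    exact (PySem.List.mem_sorted _ _ _ _).2 hy
  have hall' : ∀ z ∈ PySem.List.sorted l (fun x => x.2), (-1 : Int) ≤ z.2 :=
    fun z hz => hall z ((PySem.List.mem_sorted _ _ _ _).1 hz)
  obtain ⟨hinv, -⟩ := dedup_inv (PySem.List.sorted l (fun x => x.2)) (-1)
    (PySem.List.sorted_pairwise l (fun x => x.2)) hall'
  rw [← heq, A_eq_dedup] at hyB
  have := (hinv y hyB).1
  omega
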